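-- pv_equiv track=rewrite | github.com/thenic95/cardano-governance-scripts | drep-delegation-pools/drep_delegations_pools.py | normalize_literal
-- ===== SOURCE A (Python) =====
-- def normalize_literal(x):
--     if x is None:
--         return None
--     s = str(x).strip().lower()
--     for ch in ["-", " ", ":", "."]:
--         s = s.replace(ch, "_")
--     while "__" in s:
--         s = s.replace("__", "_")
--     return s
-- ===== SOURCE B (Python) =====
-- def normalize_literal(x):
--     if x is None:
--         return None
--     s = str(x).strip().lower()
--     out = []
--     for ch in s:
--         if ch in "-_ :.":
--             if not out or out[-1] != "_":
--                 out.append("_")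
--         else:
--             out.append(ch)
--     return "".join(out)
-- ===== Notes on version B (the rewrite author's own statement) =====
-- stated objective: alternative
-- what changed: Replaced the four sequential .replace passes plus the repeated while-loop collapse of double underscores with a single left-to-right sweep that emits an underscore for a separator only when the output does not already end in one.
import Mathlib
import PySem

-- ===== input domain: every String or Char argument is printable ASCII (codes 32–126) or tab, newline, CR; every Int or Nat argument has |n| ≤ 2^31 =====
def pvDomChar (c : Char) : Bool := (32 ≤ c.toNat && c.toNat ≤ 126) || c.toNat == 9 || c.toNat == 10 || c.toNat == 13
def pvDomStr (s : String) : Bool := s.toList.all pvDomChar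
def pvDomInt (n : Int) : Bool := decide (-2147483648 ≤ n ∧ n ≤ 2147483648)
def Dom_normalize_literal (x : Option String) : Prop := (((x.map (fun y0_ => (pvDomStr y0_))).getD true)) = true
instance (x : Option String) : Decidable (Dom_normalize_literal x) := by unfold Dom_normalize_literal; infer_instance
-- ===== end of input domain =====

-- B replaces A's four .replace passes and the repeated collapse loop with one
-- left-to-right sweep over the characters (objective: alternative; not measured faster).

-- ===== PORT A =====
-- A's string steps are ported on the List Char side via PySem.Chars (PySem.Str.* are thin
-- wrappers over these); str(x) applied to a str argument is the identity.

-- One left-to-right pass of s.replace("__", "_"); used only to justify termination of the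
-- while-loop port (proved equal to PySem.Chars.replace in pvReplace2_eq below).
def pvR : List Char → List Char
  | [] => []
  | [c] => [c]
  | c :: d :: t => if c = '_' ∧ d = '_' then '_' :: pvR t else c :: pvR (d :: t)

lemma pvR_len_le (s : List Char) : (pvR s).length ≤ s.length := by
  induction s using pvR.induct with
  | case1 => simp [pvR]
  | case2 c => simp [pvR]
  | case3 c d t h ih => simp only [pvR, if_pos h, List.length_cons]; omega
  | case4 c d t h ih => simp only [pvR, if_neg h, List.length_cons]; simpa using ih

lemma pvReplace2_go_eq (fuel : Nat) (l acc : List Char) (h : l.length ≤ fuel) :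
    PySem.Chars.replace.go ['_','_'] ['_'] fuel l acc = acc.reverse ++ pvR l := by
  induction fuel generalizing l acc with
  | zero =>
    cases l with
    | nil => simp [PySem.Chars.replace.go, pvR]
    | cons c t => simp at h
  | succ n ih =>
    cases l with
    | nil => simp [PySem.Chars.replace.go, pvR]
    | cons c t =>
      by_cases hp : List.isPrefixOf ['_','_'] (c :: t) = true
      · cases t with
        | nil => simp [List.isPrefixOf] at hp
        | cons d t' =>
          simp [List.isPrefixOf] at hp
          obtain ⟨hc, hd⟩ := hp
          subst hc; subst hd
          rw [PySem.Chars.replace.go]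
          simp only [List.isPrefixOf, BEq.rfl, Bool.and_true, if_pos]
          rw [show List.drop (['_','_'] : List Char).length ('_'::'_'::t') = t' by rfl]
          rw [ih t' (['_'].reverse ++ acc) (by simp at h ⊢; omega)]
          simp [pvR]
      · rw [PySem.Chars.replace.go]
        simp only [hp, Bool.false_eq_true, if_false]
        rw [ih t (c :: acc) (by simp at h ⊢; omega)]
        cases t with
        | nil => simp [pvR]
        | cons d t' =>
          have hcd : ¬ (c = '_' ∧ d = '_') := by
            intro ⟨h1, h2⟩; subst h1; subst h2; simp [List.isPrefixOf] at hp
          simp [pvR, if_neg hcd]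

lemma pvReplace2_eq (s : List Char) :
    PySem.Chars.replace s ['_','_'] ['_'] = pvR s := by
  rw [PySem.Chars.replace]
  simp only [List.isEmpty_cons, Bool.false_eq_true, if_false]
  simpa using pvReplace2_go_eq s.length s [] le_rfl

lemma pvR_len_lt (s : List Char) (h : ['_','_'] <:+: s) : (pvR s).length < s.length := by
  induction s using pvR.induct with
  | case1 => simp at h
  | case2 c =>
    have := h.length_le; simp at this
  | case3 c d t hcd ih =>
    have := pvR_len_le t
    simp only [pvR, if_pos hcd, List.length_cons]; omega
  | case4 c d t hcd ih =>
    simp only [pvR, if_neg hcd, List.length_cons]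
    have h' : ['_','_'] <:+: (d :: t) := by
      rcases (List.infix_cons_iff.mp h) with hpre | htl
      · exfalso
        rcases hpre with ⟨r, hr⟩
        cases hr
        exact hcd ⟨rfl, rfl⟩
      · exact htl
    have := ih h'
    simp only [List.length_cons] at this
    omega

lemma pvCollapse_dec (s : List Char) (h : PySem.Chars.isIn ['_','_'] s = true) :
    (PySem.Chars.replace s ['_','_'] ['_']).length < s.length := by
  rw [pvReplace2_eq]
  exact pvR_len_lt s ((PySem.Chars.isIn_iff_infix _ _).mp h)

-- the `while "__" in s: s = s.replace("__", "_")` loop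
def pvCollapseA (s : List Char) : List Char :=
  if h : PySem.Chars.isIn ['_','_'] s = true then
    pvCollapseA (PySem.Chars.replace s ['_','_'] ['_'])
  else s
termination_by s.length
decreasing_by exact pvCollapse_dec s h

def normalize_literal (x : Option String) : Option String :=
  match x with
  | none => none
  | some s =>
    let t0 := PySem.Chars.lower (PySem.Chars.strip s.toList)
    let t1 := [['-'], [' '], [':'], ['.']].foldl
      (fun u ch => PySem.Chars.replace u ch ['_']) t0
    some (String.mk (pvCollapseA t1))

-- ===== PORT B =====
-- port of `ch in "-_ :."` (single-character membership in that five-character string)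
def pvSep (c : Char) : Bool := (['-', '_', ' ', ':', '.'] : List Char).contains c

-- the for-loop of Source B; out is kept reversed, so Python's `not out or out[-1] != "_"`
-- is `acc.head? ≠ some '_'`, and the final "".join is the reverse
def pvBloop : List Char → List Char → List Char
  | acc, [] => acc.reverse
  | acc, c :: t =>
    if pvSep c then
      (if acc.head? ≠ some '_' then pvBloop ('_' :: acc) t else pvBloop acc t)
    else pvBloop (c :: acc) t

def normalize_literal_alt (x : Option String) : Option String :=
  match x with
  | none => none
  | some s =>
    some (String.mk (pvBloop [] (PySem.Chars.lower (PySem.Chars.strip s.toList))))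

-- ===== PRECONDITION & SPEC =====
def Spec_normalize_literal (x : Option String) (out : Option String) : Prop := out = normalize_literal_alt x
instance (x : Option String) (out : Option String) : Decidable (Spec_normalize_literal x out) := by unfold Spec_normalize_literal; infer_instance

-- ===== CLAIM (what is proved, stated in full; the proofs are below) =====
def Claim_equal_normalize_literal : Prop := ∀ (x : Option String), Dom_normalize_literal x → Spec_normalize_literal x (normalize_literal x)

-- ===== LEMMAS AND PROOFS =====

-- what one pass of A's char-substitution chain does to a single character
def pvSubst (c : Char) : Char := if pvSep c then '_' else c

-- collapse runs of '_' to a single '_'; the Bool says whether the previous output char is '_'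
def pvSquash : Bool → List Char → List Char
  | _, [] => []
  | b, c :: t =>
    if c = '_' then (if b then pvSquash true t else '_' :: pvSquash true t)
    else c :: pvSquash false t

lemma pvReplace1_go_eq (c : Char) (fuel : Nat) (l acc : List Char) (h : l.length ≤ fuel) :
    PySem.Chars.replace.go [c] ['_'] fuel l acc
      = acc.reverse ++ l.map (fun a => if a = c then '_' else a) := by
  induction fuel generalizing l acc with
  | zero =>
    cases l with
    | nil => simp [PySem.Chars.replace.go]
    | cons a t => simp at h
  | succ n ih =>
    cases l with
    | nil => simp [PySem.Chars.replace.go]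
    | cons a t =>
      rw [PySem.Chars.replace.go]
      by_cases hac : a = c
      · subst hac
        simp only [List.isPrefixOf, BEq.rfl, Bool.true_and, if_pos]
        rw [show List.drop ([a] : List Char).length (a :: t) = t by rfl]
        rw [ih t (['_'].reverse ++ acc) (by simp at h ⊢; omega)]
        simp
      · have hp : List.isPrefixOf [c] (a :: t) = false := by
          simp [List.isPrefixOf]; exact fun hh => hac hh.symm
        simp only [hp, Bool.false_eq_true, if_false]
        rw [ih t (a :: acc) (by simp at h ⊢; omega)]
        simp [hac]

lemma pvReplace1_eq (s : List Char) (c : Char) :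
    PySem.Chars.replace s [c] ['_'] = s.map (fun a => if a = c then '_' else a) := by
  rw [PySem.Chars.replace]
  simp only [List.isEmpty_cons, Bool.false_eq_true, if_false]
  simpa using pvReplace1_go_eq c s.length s [] le_rfl

lemma pvFold_eq (l : List Char) :
    [['-'], [' '], [':'], ['.']].foldl (fun u ch => PySem.Chars.replace u ch ['_']) l
      = l.map pvSubst := by
  simp only [List.foldl, pvReplace1_eq, List.map_map]
  apply List.map_congr_left
  intro a _
  simp only [Function.comp, pvSubst, pvSep, List.contains_eq_mem, List.mem_cons,
    List.not_mem_nil, or_false, decide_eq_true_eq]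
  by_cases h1 : a = '-' <;> by_cases h2 : a = ' ' <;> by_cases h3 : a = ':' <;>
    by_cases h4 : a = '.' <;> by_cases h5 : a = '_' <;> simp_all

lemma pvSquash_pvR (s : List Char) : ∀ b, pvSquash b (pvR s) = pvSquash b s := by
  induction s using pvR.induct with
  | case1 => intro b; rfl
  | case2 c => intro b; rfl
  | case3 c d t hcd ih =>
    intro b
    obtain ⟨hc, hd⟩ := hcd; subst hc; subst hd
    simp only [pvR, and_self, if_pos]
    simp [pvSquash, ih]
  | case4 c d t hcd ih =>
    intro b
    simp only [pvR, if_neg hcd]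
    by_cases hc : c = '_' <;> simp [pvSquash, hc, ih]

lemma pvSquash_id (s : List Char) (hni : ¬ ['_','_'] <:+: s) :
    pvSquash false s = s ∧ (s.head? ≠ some '_' → pvSquash true s = s) := by
  induction s with
  | nil => simp [pvSquash]
  | cons c t ih =>
    have ht : ¬ ['_','_'] <:+: t := fun hh => hni (List.infix_cons_iff.mpr (Or.inr hh))
    obtain ⟨ih1, ih2⟩ := ih ht
    by_cases hc : c = '_'
    · subst hc
      have hth : t.head? ≠ some '_' := by
        intro hh
        cases t with
        | nil => simp at hh
        | cons d t' =>
          simp at hh; subst hh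
          exact hni (List.infix_cons_iff.mpr (Or.inl ⟨t', rfl⟩))
      constructor
      · simp [pvSquash, ih2 hth]
      · intro hh; simp at hh
    · constructor
      · simp [pvSquash, hc, ih1]
      · intro _; simp [pvSquash, hc, ih1]

lemma pvCollapseA_eq (s : List Char) : pvCollapseA s = pvSquash false s := by
  induction s using pvCollapseA.induct with
  | case1 s h ih =>
    rw [pvCollapseA, dif_pos h, ih, pvReplace2_eq, pvSquash_pvR]
  | case2 s h =>
    rw [pvCollapseA, dif_neg h]
    have : ¬ ['_','_'] <:+: s := by
      intro hh
      exact h ((PySem.Chars.isIn_iff_infix _ _).mpr hh)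
    exact ((pvSquash_id s this).1).symm

lemma pvBloop_eq (t : List Char) : ∀ acc,
    pvBloop acc t = acc.reverse ++ pvSquash (acc.head? == some '_') (t.map pvSubst) := by
  induction t with
  | nil => intro acc; simp [pvBloop, pvSquash]
  | cons c t ih =>
    intro acc
    by_cases hs : pvSep c
    · have hsubst : pvSubst c = '_' := by simp [pvSubst, hs]
      by_cases hh : acc.head? = some '_'
      · simp only [pvBloop, hs, if_pos, hh, ne_eq, not_true_eq_false, if_false, ih]
        simp [hsubst, pvSquash]
      · simp only [pvBloop, hs, if_pos, hh, ne_eq, not_false_eq_true, ih]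
        simp [hsubst, pvSquash, hh]
    · have hc : c ≠ '_' := by rintro rfl; simp [pvSep] at hs
      simp only [pvBloop, hs, Bool.false_eq_true, if_false, ih]
      have hce : (c == '_') = false := by simp [hc]
      by_cases hh : acc.head? = some '_' <;>
        simp [pvSubst, hs, pvSquash, hc, hh, hce]

-- ===== VERDICT (by name: the statement is the Claim_ definition above) =====
theorem normalize_literal_spec : Claim_equal_normalize_literal := by
  intro x _
  unfold Spec_normalize_literal
  cases x with
  | none => rfl
  | some s =>
    simp only [normalize_literal, normalize_literal_alt]
    rw [pvFold_eq, pvCollapseA_eq, pvBloop_eq]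
    simp
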